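-- pv_equiv track=rewrite | github.com/todd-gig/master-knowledge-base | decision-execution-engine/app/engine/state_machine.py | full_path_to_execution
-- ===== SOURCE A (Python) =====
-- ACTION_TRANSITIONS: dict[tuple[str, str], str] = {
--     # From draft
--     ("draft", "needs_data"): "draft",
--     ("draft", "block"): "draft",
--     ("draft", "escalate"): "qualified",
--     ("draft", "execute"): "execution_cleared",
--     # From qualified
--     ("qualified", "execute"): "value_confirmed",
--     ("qualified", "escalate"): "qualified",
--     ("qualified", "block"): "draft",
--     # From value_confirmed
--     ("value_confirmed", "execute"): "trust_certified",
--     ("value_confirmed", "block"): "qualified",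
--     # From trust_certified
--     ("trust_certified", "execute"): "execution_cleared",
--     ("trust_certified", "block"): "qualified",
--     # From execution_cleared
--     ("execution_cleared", "execute"): "executed",
--     ("execution_cleared", "block"): "trust_certified",
--     # From executed
--     ("executed", "review"): "reviewed",
--     ("executed", "escalate"): "reviewed",
--     # From reviewed
--     ("reviewed", "archive"): "archived",
--     ("reviewed", "escalate"): "qualified",
-- }
--
-- def full_path_to_execution(current_state: str) -> list[str]:
--     """Return the shortest action sequence from current state to 'executed'."""
--     if current_state == "executed":
--         return []
--     # BFS
--     from collections import deque
--     visited: set[str] = set()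
--     queue: deque[tuple[str, list[str]]] = deque([(current_state, [])])
--     while queue:
--         state, path = queue.popleft()
--         if state in visited:
--             continue
--         visited.add(state)
--         for (s, action), target in ACTION_TRANSITIONS.items():
--             if s == state and target not in visited:
--                 new_path = path + [action]
--                 if target == "executed":
--                     return new_path
--                 queue.append((target, new_path))
--     return []  # no path found
-- ===== SOURCE B (Python) =====
-- ACTION_TRANSITIONS: dict[tuple[str, str], str] = {
--     ("draft", "needs_data"): "draft",
--     ("draft", "block"): "draft",
--     ("draft", "escalate"): "qualified",
--     ("draft", "execute"): "execution_cleared",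
--     ("qualified", "execute"): "value_confirmed",
--     ("qualified", "escalate"): "qualified",
--     ("qualified", "block"): "draft",
--     ("value_confirmed", "execute"): "trust_certified",
--     ("value_confirmed", "block"): "qualified",
--     ("trust_certified", "execute"): "execution_cleared",
--     ("trust_certified", "block"): "qualified",
--     ("execution_cleared", "execute"): "executed",
--     ("execution_cleared", "block"): "trust_certified",
--     ("executed", "review"): "reviewed",
--     ("executed", "escalate"): "reviewed",
--     ("reviewed", "archive"): "archived",
--     ("reviewed", "escalate"): "qualified",
-- }
--
--
-- def full_path_to_execution(current_state: str) -> list[str]: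
--     """Return the shortest action sequence from current state to 'executed'."""
--     # Reverse transitions: target -> list of (source, action).
--     rev: dict[str, list[tuple[str, str]]] = {}
--     for (s, action), target in ACTION_TRANSITIONS.items():
--         rev.setdefault(target, []).append((s, action))
--     # Backward BFS from 'executed': first action on a shortest path, per state.
--     next_action: dict[str, str] = {}
--     frontier = ["executed"]
--     while frontier:
--         new_frontier = []
--         for t in frontier:
--             for (s, action) in rev.get(t, []):
--                 if s != "executed" and s not in next_action:
--                     next_action[s] = action
--                     new_frontier.append(s)
--         frontier = new_frontier
--     # Forward reconstruction.
--     path: list[str] = []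
--     state = current_state
--     while state != "executed":
--         if state not in next_action:
--             return []
--         action = next_action[state]
--         path.append(action)
--         state = ACTION_TRANSITIONS[(state, action)]
--     return path
-- ===== Notes on version B (the rewrite author's own statement) =====
-- stated objective: alternative
-- what changed: A runs a forward BFS that carries a whole candidate path with every queue entry and returns as soon as it enqueues the target state; B instead builds the reverse transition relation, runs one backward BFS from the target filling a next_action table, then reconstructs the path by a separate forward following pass.
import Mathlib
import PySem

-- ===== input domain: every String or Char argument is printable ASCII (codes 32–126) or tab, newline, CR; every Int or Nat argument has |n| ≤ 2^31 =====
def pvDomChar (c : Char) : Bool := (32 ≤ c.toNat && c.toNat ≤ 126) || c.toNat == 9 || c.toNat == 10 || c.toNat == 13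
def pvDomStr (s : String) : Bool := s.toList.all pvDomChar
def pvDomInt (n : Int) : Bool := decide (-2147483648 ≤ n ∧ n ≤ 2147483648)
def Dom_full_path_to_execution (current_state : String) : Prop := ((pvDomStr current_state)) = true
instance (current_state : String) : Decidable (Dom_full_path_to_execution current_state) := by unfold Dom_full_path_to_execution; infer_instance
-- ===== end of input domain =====

-- B replaces A's forward BFS that carries whole candidate paths with a backward BFS from
-- 'executed' building a first-action table once, followed by a forward reconstruction pass.

-- ===== PORT A =====
def ACTION_TRANSITIONS_L : List ((String × String) × String) :=
  [ (("draft", "needs_data"), "draft"),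
    (("draft", "block"), "draft"),
    (("draft", "escalate"), "qualified"),
    (("draft", "execute"), "execution_cleared"),
    (("qualified", "execute"), "value_confirmed"),
    (("qualified", "escalate"), "qualified"),
    (("qualified", "block"), "draft"),
    (("value_confirmed", "execute"), "trust_certified"),
    (("value_confirmed", "block"), "qualified"),
    (("trust_certified", "execute"), "execution_cleared"),
    (("trust_certified", "block"), "qualified"),
    (("execution_cleared", "execute"), "executed"),
    (("execution_cleared", "block"), "trust_certified"),
    (("executed", "review"), "reviewed"),
    (("executed", "escalate"), "reviewed"),
    (("reviewed", "archive"), "archived"),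
    (("reviewed", "escalate"), "qualified") ]

-- inner 'for (s, action), target in ACTION_TRANSITIONS.items()' loop of A; early return = .inl
def aScan (state : String) (path : List String) (visited : PySem.Set String) :
    List ((String × String) × String) → List (String × List String) →
    Sum (List String) (List (String × List String))
  | [], queue => .inr queue
  | ((s, action), target) :: rest, queue =>
    if s == state && !(PySem.Set.contains visited target) then
      let new_path := path ++ [action]
      if target == "executed" then .inl new_path
      else aScan state path visited rest (queue ++ [(target, new_path)])
    else aScan state path visited rest queue

-- A's 'while queue' loop; fuel only makes the recursion total and is never exhausted
def aBFS : Nat → PySem.Set String → List (String × List String) → List String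
  | 0, _, _ => []
  | _ + 1, _, [] => []
  | fuel + 1, visited, (state, path) :: rest =>
    if PySem.Set.contains visited state then aBFS fuel visited rest
    else
      let visited' := PySem.Set.add visited state
      match aScan state path visited' ACTION_TRANSITIONS_L rest with
      | .inl p => p
      | .inr queue => aBFS fuel visited' queue

def full_path_to_execution (current_state : String) : List String :=
  if current_state == "executed" then []
  else aBFS 1000 PySem.Set.empty [(current_state, [])]

-- ===== PORT B =====
-- rev.setdefault(target, []).append((s, action)) over ACTION_TRANSITIONS.items()
def bRev : PySem.Dict String (List (String × String)) :=
  ACTION_TRANSITIONS_L.foldl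
    (fun d e => d.modify e.2 [] (· ++ [e.1])) PySem.Dict.empty

def bInner (rev_entries : List (String × String)) :
    PySem.Dict String String × List String → PySem.Dict String String × List String :=
  fun st => rev_entries.foldl
    (fun (p : PySem.Dict String String × List String) (e : String × String) =>
      if e.1 != "executed" && !(p.1.contains e.1) then
        (p.1.insert e.1 e.2, p.2 ++ [e.1])
      else p) st

-- 'while frontier' backward-BFS loop; fuel only for totality
def bOuter (rev : PySem.Dict String (List (String × String))) :
    Nat → PySem.Dict String String → List String → PySem.Dict String String
  | 0, na, _ => na
  | fuel + 1, na, frontier =>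
    match frontier with
    | [] => na
    | _ =>
      let p := frontier.foldl (fun st t => bInner (rev.getD t []) st) (na, [])
      bOuter rev fuel p.1 p.2

def ACTION_TRANSITIONS_D : PySem.Dict (String × String) String :=
  PySem.Dict.ofList ACTION_TRANSITIONS_L

-- forward 'while state != "executed"' reconstruction; fuel only for totality.
-- The getD lookup can never miss: the action stored in the table came from ACTION_TRANSITIONS.
def bFollow (na : PySem.Dict String String) :
    Nat → String → List String → List String
  | 0, _, path => path
  | fuel + 1, state, path =>
    if state == "executed" then path
    else
      match na.get? state with
      | none => []
      | some action =>
        bFollow na fuel (ACTION_TRANSITIONS_D.getD (state, action) "") (path ++ [action])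

def full_path_to_execution_alt (current_state : String) : List String :=
  let na := bOuter bRev 20 PySem.Dict.empty ["executed"]
  bFollow na 20 current_state []

-- ===== PRECONDITION & SPEC =====
def Spec_full_path_to_execution (current_state : String) (out : List String) : Prop := out = full_path_to_execution_alt current_state
instance (current_state : String) (out : List String) : Decidable (Spec_full_path_to_execution current_state out) := by unfold Spec_full_path_to_execution; infer_instance

-- ===== CLAIM (what is proved, stated in full; the proofs are below) =====
def Claim_equal_full_path_to_execution : Prop := ∀ (current_state : String), Dom_full_path_to_execution current_state → Spec_full_path_to_execution current_state (full_path_to_execution current_state)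

-- ===== LEMMAS AND PROOFS =====

theorem bTable_eq : bOuter bRev 20 PySem.Dict.empty ["executed"] =
    PySem.Dict.mk [("execution_cleared", "execute"), ("draft", "execute"),
      ("trust_certified", "execute"), ("qualified", "block"),
      ("value_confirmed", "execute"), ("reviewed", "escalate")] := by
  rfl


theorem aScan_nomatch (state : String) (path : List String) (visited : PySem.Set String)
    (L : List ((String × String) × String)) (q : List (String × List String))
    (h : ∀ e ∈ L, (e.1.1 == state) = false) :
    aScan state path visited L q = .inr q := by
  induction L generalizing q with
  | nil => rfl
  | cons e rest ih =>
    obtain ⟨⟨es, ea⟩, et⟩ := e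
    have he := h _ (List.mem_cons_self ..)
    simp only at he
    simp only [aScan, he, Bool.false_and, Bool.false_eq_true, if_false]
    exact ih _ (fun x hx => h x (List.mem_cons_of_mem _ hx))

theorem A_unknown (s : String)
    (h1 : s ≠ "draft") (h2 : s ≠ "qualified") (h3 : s ≠ "value_confirmed")
    (h4 : s ≠ "trust_certified") (h5 : s ≠ "execution_cleared")
    (h6 : s ≠ "executed") (h7 : s ≠ "reviewed") :
    full_path_to_execution s = [] := by
  have f1 : ("draft" == s) = false := beq_eq_false_iff_ne.mpr (fun h => h1 h.symm)
  have f2 : ("qualified" == s) = false := beq_eq_false_iff_ne.mpr (fun h => h2 h.symm)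
  have f3 : ("value_confirmed" == s) = false := beq_eq_false_iff_ne.mpr (fun h => h3 h.symm)
  have f4 : ("trust_certified" == s) = false := beq_eq_false_iff_ne.mpr (fun h => h4 h.symm)
  have f5 : ("execution_cleared" == s) = false := beq_eq_false_iff_ne.mpr (fun h => h5 h.symm)
  have f6 : ("executed" == s) = false := beq_eq_false_iff_ne.mpr (fun h => h6 h.symm)
  have f7 : ("reviewed" == s) = false := beq_eq_false_iff_ne.mpr (fun h => h7 h.symm)
  have g6 : (s == "executed") = false := beq_eq_false_iff_ne.mpr h6
  have hmem : ∀ e ∈ ACTION_TRANSITIONS_L, (e.1.1 == s) = false := by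
    intro e he
    simp only [ACTION_TRANSITIONS_L, List.mem_cons, List.not_mem_nil, or_false] at he
    rcases he with rfl|rfl|rfl|rfl|rfl|rfl|rfl|rfl|rfl|rfl|rfl|rfl|rfl|rfl|rfl|rfl|rfl <;>
      assumption
  rw [full_path_to_execution, if_neg (by simp [g6])]
  rw [show (1000 : Nat) = 999 + 1 from rfl, aBFS,
    if_neg (by simp [PySem.Set.contains, PySem.Set.empty]),
    ]
  simp only [aScan_nomatch _ _ _ _ _ hmem]
  rfl

theorem B_unknown (s : String) (h6 : s ≠ "executed")
    (h1 : s ≠ "draft") (h2 : s ≠ "qualified") (h3 : s ≠ "value_confirmed")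
    (h4 : s ≠ "trust_certified") (h5 : s ≠ "execution_cleared")
    (h7 : s ≠ "reviewed") :
    full_path_to_execution_alt s = [] := by
  have g6 : (s == "executed") = false := beq_eq_false_iff_ne.mpr h6
  have f1 : ("draft" == s) = false := beq_eq_false_iff_ne.mpr (fun h => h1 h.symm)
  have f2 : ("qualified" == s) = false := beq_eq_false_iff_ne.mpr (fun h => h2 h.symm)
  have f3 : ("value_confirmed" == s) = false := beq_eq_false_iff_ne.mpr (fun h => h3 h.symm)
  have f4 : ("trust_certified" == s) = false := beq_eq_false_iff_ne.mpr (fun h => h4 h.symm)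
  have f5 : ("execution_cleared" == s) = false := beq_eq_false_iff_ne.mpr (fun h => h5 h.symm)
  have f7 : ("reviewed" == s) = false := beq_eq_false_iff_ne.mpr (fun h => h7 h.symm)
  rw [full_path_to_execution_alt]
  simp only [bTable_eq]
  rw [show (20 : Nat) = 19 + 1 from rfl, bFollow]
  simp only [g6, Bool.false_eq_true, if_false, PySem.Dict.get?, List.find?,
    f1, f2, f3, f4, f5, f7]
  rfl

-- ===== VERDICT (by name: the statement is the Claim_ definition above) =====
theorem full_path_to_execution_spec : Claim_equal_full_path_to_execution := by
  intro s _
  unfold Spec_full_path_to_execution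
  by_cases h1 : s = "draft"; · subst h1; rfl
  by_cases h2 : s = "qualified"; · subst h2; rfl
  by_cases h3 : s = "value_confirmed"; · subst h3; rfl
  by_cases h4 : s = "trust_certified"; · subst h4; rfl
  by_cases h5 : s = "execution_cleared"; · subst h5; rfl
  by_cases h6 : s = "executed"; · subst h6; rfl
  by_cases h7 : s = "reviewed"; · subst h7; rfl
  rw [A_unknown s h1 h2 h3 h4 h5 h6 h7, B_unknown s h6 h1 h2 h3 h4 h5 h7]
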